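-- pv_equiv track=rewrite | github.com/skvcool-rgb/KOS-Organism | kos/grid_primitives.py | repeat_pattern
-- ===== SOURCE A (Python) =====
-- from typing import Any, Callable, Dict, List, Tuple
--
-- Grid = List[List[int]]
--
-- def repeat_pattern(g: Grid) -> Grid:
--     """Find smallest repeating unit and use it to fill the full grid."""
--     if not g or not g[0]: return g
--     rows, cols = len(g), len(g[0])
--     # Try to find period in rows
--     for pr in range(1, rows // 2 + 1):
--         if rows % pr != 0: continue
--         pattern = g[:pr]
--         matches = True
--         for i in range(pr, rows, pr):
--             for j in range(pr):
--                 if i + j < rows and g[i+j] != pattern[j]: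
--                     matches = False; break
--             if not matches: break
--         if matches:
--             # Try to find period in cols too
--             for pc in range(1, cols // 2 + 1):
--                 if cols % pc != 0: continue
--                 col_pattern = [row[:pc] for row in pattern]
--                 col_matches = True
--                 for row_idx, row in enumerate(pattern):
--                     for j in range(pc, cols, pc):
--                         for k in range(pc):
--                             if j + k < cols and row[j+k] != col_pattern[row_idx][k]:
--                                 col_matches = False; break
--                         if not col_matches: break
--                     if not col_matches: break
--                 if col_matches:
--                     # Reconstruct from minimal pattern
--                     result = []
--                     for i in range(rows):
--                         row = []
--                         for j in range(cols):
--                             row.append(col_pattern[i % pr][j % pc])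
--                         result.append(row)
--                     return result
--     return g  # No repeating pattern found
-- ===== SOURCE B (Python) =====
-- def repeat_pattern(g):
--     """Find smallest repeating unit and use it to fill the full grid.
--
--     On a rectangular grid the period search only succeeds when the verified
--     reconstruction reproduces the grid exactly, so the function is the identity.
--     """
--     return g
-- ===== Notes on version B (the rewrite author's own statement) =====
-- stated objective: simpler
-- what changed: B returns the input unchanged in a single statement: on rectangular grids the nested period search only succeeds when the reconstruction from the minimal pattern reproduces the input exactly, so the whole divisor/period scan is dead code.
import Mathlib
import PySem

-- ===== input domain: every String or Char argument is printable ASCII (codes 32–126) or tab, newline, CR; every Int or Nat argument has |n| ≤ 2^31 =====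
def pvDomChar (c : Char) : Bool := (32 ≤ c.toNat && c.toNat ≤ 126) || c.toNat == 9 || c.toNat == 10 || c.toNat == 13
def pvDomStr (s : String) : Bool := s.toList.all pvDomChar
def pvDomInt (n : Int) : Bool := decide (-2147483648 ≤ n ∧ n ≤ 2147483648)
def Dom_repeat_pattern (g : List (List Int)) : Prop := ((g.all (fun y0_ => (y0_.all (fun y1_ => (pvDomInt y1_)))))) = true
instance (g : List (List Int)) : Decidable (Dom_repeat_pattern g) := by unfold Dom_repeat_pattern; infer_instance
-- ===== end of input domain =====

-- B is the identity: on rectangular grids A's verified reconstruction always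
-- reproduces the input, so the nested period search is dead code (objective: simpler).

-- ===== PORT A =====

-- range(a, b, step) for the nonnegative Nat-valued loop bounds A uses (step > 0)
def rangeStep (a b step : Nat) : List Nat :=
  if _h : 0 < step ∧ a < b then a :: rangeStep (a + step) b step else []
  termination_by b - a
  decreasing_by omega

-- inner row-period check: for i in range(pr, rows, pr): for j in range(pr):
--   mismatch iff i+j < rows and g[i+j] != pattern[j]   (pattern = g[:pr]; all indexing in range)
def rowMatchA (g : List (List Int)) (pr rows : Nat) : Bool :=
  (rangeStep pr rows pr).all (fun i =>
    (rangeStep 0 pr 1).all (fun j =>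
      if i + j < rows then g.getD (i + j) [] == (g.take pr).getD j [] else true))

-- column-period check over the pattern rows; col_pattern[row_idx] = row[:pc].
-- row[j+k] can be out of range in Python (IndexError); such inputs are outside
-- Pre_repeat_pattern, the port totalises that access with getD's default.
def colMatchA (pattern : List (List Int)) (pc cols : Nat) : Bool :=
  pattern.all (fun row =>
    (rangeStep pc cols pc).all (fun j =>
      (rangeStep 0 pc 1).all (fun k =>
        if j + k < cols then row.getD (j + k) 0 == (row.take pc).getD k 0 else true)))

-- result = [[col_pattern[i % pr][j % pc] for j in range(cols)] for i in range(rows)]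
def reconstructA (g : List (List Int)) (pr pc rows cols : Nat) : List (List Int) :=
  (rangeStep 0 rows 1).map (fun i =>
    (rangeStep 0 cols 1).map (fun j =>
      (((g.take pr).getD (i % pr) []).take pc).getD (j % pc) 0))

-- the pc loop: first pc with cols % pc == 0 and col_matches returns the reconstruction
def tryColsA (g : List (List Int)) (pr rows cols : Nat) : List Nat → Option (List (List Int))
  | [] => none
  | pc :: rest =>
    if cols % pc ≠ 0 then tryColsA g pr rows cols rest
    else if colMatchA (g.take pr) pc cols then some (reconstructA g pr pc rows cols)
    else tryColsA g pr rows cols rest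

-- the pr loop: skip non-divisors; on a row match search columns, returning on success
def mainLoopA (g : List (List Int)) (rows cols : Nat) : List Nat → List (List Int)
  | [] => g
  | pr :: rest =>
    if rows % pr ≠ 0 then mainLoopA g rows cols rest
    else if rowMatchA g pr rows then
      match tryColsA g pr rows cols (rangeStep 1 (cols / 2 + 1) 1) with
      | some r => r
      | none => mainLoopA g rows cols rest
    else mainLoopA g rows cols rest

def repeat_pattern (g : List (List Int)) : List (List Int) :=
  match g with
  | [] => g
  | r0 :: _ =>
    if r0.isEmpty then g
    else mainLoopA g g.length r0.length (rangeStep 1 (g.length / 2 + 1) 1)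

-- ===== PORT B =====
def repeat_pattern_alt (g : List (List Int)) : List (List Int) := g

-- ===== PRECONDITION & SPEC =====

-- g is row-periodic: some proper period pr divides the row count and every row equals
-- the corresponding pattern row.
def RowPeriodicA (g : List (List Int)) : Prop :=
  ∃ pr ∈ Finset.Icc 1 (g.length / 2),
    g.length % pr = 0 ∧ ∀ i < g.length, g.getD i [] = g.getD (i % pr) []

-- Pre_ restricts to Grid's natural domain plus the harmless rest: it admits every rectangular
-- grid and every grid that is not row-periodic; it excludes only ragged row-periodic grids,
-- on which A's behaviour is accidental (it raises IndexError on a too-short pattern row, or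
-- returns the grid truncated to the first row's width).
def Pre_repeat_pattern (g : List (List Int)) : Prop :=
  (∀ row ∈ g, row.length = (g.headD []).length) ∨ ¬ RowPeriodicA g

instance (g : List (List Int)) : Decidable (Pre_repeat_pattern g) := by
  unfold Pre_repeat_pattern RowPeriodicA; infer_instance

def pvWitness_repeat_pattern : List (List Int) := [[1, 2], [3, 4]]

def Spec_repeat_pattern (g : List (List Int)) (out : List (List Int)) : Prop := out = repeat_pattern_alt g
instance (g : List (List Int)) (out : List (List Int)) : Decidable (Spec_repeat_pattern g out) := by unfold Spec_repeat_pattern; infer_instance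

-- ===== CLAIM (what is proved, stated in full; the proofs are below) =====
def Claim_equal_repeat_pattern : Prop := ∀ (g : List (List Int)), Dom_repeat_pattern g → Pre_repeat_pattern g → Spec_repeat_pattern g (repeat_pattern g)

-- ===== LEMMAS AND PROOFS =====

theorem rangeStep_mem {a b s x : Nat} (hx : x ∈ rangeStep a b s) :
    (∃ t, x = a + s * t) ∧ x < b := by
  by_cases h : 0 < s ∧ a < b
  · rw [rangeStep, dif_pos h] at hx
    rcases List.mem_cons.1 hx with rfl | hx
    · exact ⟨⟨0, by omega⟩, h.2⟩
    · obtain ⟨⟨t, rfl⟩, hb⟩ := rangeStep_mem hx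
      exact ⟨⟨t + 1, by ring⟩, hb⟩
  · rw [rangeStep, dif_neg h] at hx
    simp at hx
termination_by b - a
decreasing_by omega

theorem mem_rangeStep {a b s x : Nat} (hs : 0 < s) (t : Nat)
    (hx : x = a + s * t) (hb : x < b) : x ∈ rangeStep a b s := by
  induction t generalizing a x with
  | zero =>
    have h0 : s * 0 = 0 := by ring
    rw [rangeStep, dif_pos ⟨hs, by omega⟩]
    exact List.mem_cons.2 (Or.inl (by omega))
  | succ t ih =>
    have hst : s * (t + 1) = s * t + s := by ring
    rw [rangeStep, dif_pos ⟨hs, by omega⟩]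
    exact List.mem_cons.2 (Or.inr (ih (a := a + s) (by omega) hb))

theorem getD_take_of_lt {l : List (List Int)} {p j : Nat} (hj : j < p) :
    (l.take p).getD j [] = l.getD j [] := by
  simp [List.getD, hj]

theorem getD_take_of_lt' {l : List Int} {p j : Nat} (hj : j < p) :
    (l.take p).getD j 0 = l.getD j 0 := by
  simp [List.getD, hj]

-- a row match means g is periodic (as getD values) with period pr
theorem rowMatchA_spec {g : List (List Int)} {pr rows : Nat}
    (hm : rowMatchA g pr rows = true) (hpr : 0 < pr) (hrows : rows = g.length) :
    ∀ i < rows, g.getD i [] = g.getD (i % pr) [] := by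
  intro i hi
  by_cases hlt : i < pr
  · rw [Nat.mod_eq_of_lt hlt]
  · have hle : pr ≤ i := by omega
    have hq : 1 ≤ i / pr := (Nat.one_le_div_iff hpr).2 hle
    obtain ⟨q', hq'⟩ : ∃ q', i / pr = q' + 1 := ⟨i / pr - 1, by omega⟩
    have hdec : pr * (i / pr) + i % pr = i := Nat.div_add_mod i pr
    have hsplit : pr * (i / pr) = pr + pr * q' := by rw [hq']; ring
    have hmemi : pr * (i / pr) ∈ rangeStep pr rows pr :=
      mem_rangeStep hpr q' hsplit (by omega)
    have hmemj : i % pr ∈ rangeStep 0 pr 1 :=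
      mem_rangeStep Nat.one_pos (i % pr) (by omega) (Nat.mod_lt i hpr)
    have h1 := List.all_eq_true.1 hm _ hmemi
    have h2 := List.all_eq_true.1 h1 _ hmemj
    rw [if_pos (by omega : pr * (i / pr) + i % pr < rows)] at h2
    have h3 := eq_of_beq h2
    rw [hdec] at h3
    rw [h3, getD_take_of_lt (Nat.mod_lt i hpr)]

-- a column match means each pattern row is periodic (as getD values) with period pc
theorem colMatchA_spec {pat : List (List Int)} {pc cols : Nat}
    (hm : colMatchA pat pc cols = true) (hpc : 0 < pc) :
    ∀ row ∈ pat, ∀ j < cols, row.getD j 0 = row.getD (j % pc) 0 := by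
  intro row hrow j hj
  have hrm := List.all_eq_true.1 hm _ hrow
  by_cases hlt : j < pc
  · rw [Nat.mod_eq_of_lt hlt]
  · have hle : pc ≤ j := by omega
    have hq : 1 ≤ j / pc := (Nat.one_le_div_iff hpc).2 hle
    obtain ⟨q', hq'⟩ : ∃ q', j / pc = q' + 1 := ⟨j / pc - 1, by omega⟩
    have hdec : pc * (j / pc) + j % pc = j := Nat.div_add_mod j pc
    have hsplit : pc * (j / pc) = pc + pc * q' := by rw [hq']; ring
    have hmemj : pc * (j / pc) ∈ rangeStep pc cols pc :=
      mem_rangeStep hpc q' hsplit (by omega)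
    have hmemk : j % pc ∈ rangeStep 0 pc 1 :=
      mem_rangeStep Nat.one_pos (j % pc) (by omega) (Nat.mod_lt j hpc)
    have h1 := List.all_eq_true.1 hrm _ hmemj
    have h2 := List.all_eq_true.1 h1 _ hmemk
    rw [if_pos (by omega : pc * (j / pc) + j % pc < cols)] at h2
    have h3 := eq_of_beq h2
    rw [hdec] at h3
    rw [h3, getD_take_of_lt' (Nat.mod_lt j hpc)]

theorem rangeStep_one (a n : Nat) : rangeStep a n 1 = List.range' a (n - a) := by
  by_cases h : a < n
  · rw [rangeStep, dif_pos ⟨Nat.one_pos, h⟩, rangeStep_one (a + 1) n]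
    have he : n - a = (n - (a + 1)) + 1 := by omega
    rw [he, List.range'_succ]
  · rw [rangeStep, dif_neg (by omega)]
    have he : n - a = 0 := by omega
    rw [he, List.range'_zero]
termination_by n - a
decreasing_by omega

theorem rangeStep_zero_one (n : Nat) : rangeStep 0 n 1 = List.range n := by
  rw [rangeStep_one, Nat.sub_zero, List.range_eq_range']

-- the reconstruction from a verified (pr, pc) pattern reproduces the grid
theorem reconstructA_eq {g : List (List Int)} {pr pc rows cols : Nat}
    (hrows : rows = g.length) (hpr : 0 < pr) (hpc : 0 < pc) (hprle : pr ≤ rows)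
    (hrowper : ∀ i < rows, g.getD i [] = g.getD (i % pr) [])
    (hcolper : ∀ row ∈ g.take pr, ∀ j < cols, row.getD j 0 = row.getD (j % pc) 0)
    (hrect : ∀ row ∈ g, row.length = cols) :
    reconstructA g pr pc rows cols = g := by
  unfold reconstructA
  rw [rangeStep_zero_one, rangeStep_zero_one]
  apply List.ext_getElem
  · simp [hrows]
  · intro i hi₁ hi₂
    simp only [List.getElem_map, List.getElem_range]
    have hi : i < rows := by simpa using hi₁
    have hig : i < g.length := hrows ▸ hi
    apply List.ext_getElem
    · simp [hrect g[i] (List.getElem_mem hig)]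
    · intro j hj₁ hj₂
      simp only [List.getElem_map, List.getElem_range]
      have hj : j < cols := by simpa using hj₁
      have himod : i % pr < g.length := lt_of_lt_of_le (Nat.mod_lt i hpr) (hrows ▸ hprle)
      have hjmod : j % pc < pc := Nat.mod_lt j hpc
      rw [getD_take_of_lt (Nat.mod_lt i hpr), getD_take_of_lt' hjmod]
      have hrowmem : g.getD (i % pr) [] ∈ g.take pr := by
        rw [List.getD_eq_getElem _ _ himod]
        have htk : (g.take pr)[i % pr]'(by
            simp only [List.length_take]
            exact lt_min (Nat.mod_lt i hpr) himod) = g[i % pr] := List.getElem_take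
        rw [← htk]
        exact List.getElem_mem _
      have hcp := hcolper _ hrowmem j hj
      rw [← hcp]
      have hri : g.getD i [] = g.getD (i % pr) [] := hrowper i hi
      rw [← hri, List.getD_eq_getElem _ _ hig]
      have hjlen : j < (g[i]).length := by
        rw [hrect g[i] (List.getElem_mem hig)]; exact hj
      rw [List.getD_eq_getElem _ _ hjlen]

-- any successful pc candidate yields g back (rectangular, row-periodic case)
theorem tryColsA_some {g : List (List Int)} {pr rows cols : Nat} {r : List (List Int)}
    (hrows : rows = g.length) (hpr : 0 < pr) (hprle : pr ≤ rows)
    (hrowper : ∀ i < rows, g.getD i [] = g.getD (i % pr) [])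
    (hrect : ∀ row ∈ g, row.length = cols) :
    ∀ pcs : List Nat, (∀ pc ∈ pcs, 0 < pc) →
      tryColsA g pr rows cols pcs = some r → r = g := by
  intro pcs
  induction pcs with
  | nil => intro _ h; simp [tryColsA] at h
  | cons pc rest ih =>
    intro hpos h
    rw [tryColsA] at h
    split_ifs at h with h1 h2
    · exact ih (fun x hx => hpos x (List.mem_cons_of_mem _ hx)) h
    · have hpc : 0 < pc := hpos pc List.mem_cons_self
      have hcp := colMatchA_spec h2 hpc
      have hr := Option.some.inj h
      rw [← hr]
      exact reconstructA_eq hrows hpr hpc hprle hrowper hcp hrect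
    · exact ih (fun x hx => hpos x (List.mem_cons_of_mem _ hx)) h

theorem mainLoopA_eq {g : List (List Int)} {rows cols : Nat}
    (hrows : rows = g.length) (hpre : Pre_repeat_pattern g)
    (hcols : cols = (g.headD []).length) :
    ∀ prs : List Nat, (∀ pr ∈ prs, 0 < pr ∧ pr ≤ rows / 2) →
      mainLoopA g rows cols prs = g := by
  intro prs
  induction prs with
  | nil => intro _; rfl
  | cons pr rest ih =>
    intro hb
    rw [mainLoopA]
    have hrest : ∀ x ∈ rest, 0 < x ∧ x ≤ rows / 2 :=
      fun x hx => hb x (List.mem_cons_of_mem _ hx)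
    split_ifs with h1 h2
    · exact ih hrest
    · -- row match found: g is row-periodic, so Pre_ forces rectangularity
      obtain ⟨hpr, hprle⟩ := hb pr List.mem_cons_self
      have hper := rowMatchA_spec h2 hpr hrows
      have hperiodic : RowPeriodicA g := by
        refine ⟨pr, Finset.mem_Icc.2 ⟨hpr, hrows ▸ hprle⟩, ?_, ?_⟩
        · rw [← hrows]; omega
        · intro i hi
          exact hper i (hrows ▸ hi)
      have hrect : ∀ row ∈ g, row.length = (g.headD []).length := by
        rcases hpre with h | h
        · exact h
        · exact absurd hperiodic h
      have hprle' : pr ≤ rows := le_trans hprle (Nat.div_le_self rows 2)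
      cases htc : tryColsA g pr rows cols (rangeStep 1 (cols / 2 + 1) 1) with
      | none => exact ih hrest
      | some r =>
        refine tryColsA_some hrows hpr hprle' hper (hcols ▸ hrect) _ ?_ htc
        intro pc hpc
        obtain ⟨⟨t, ht⟩, _⟩ := rangeStep_mem hpc
        omega
    · exact ih hrest


-- ===== VERDICT (by name: the statement is the Claim_ definition above) =====
theorem repeat_pattern_spec : Claim_equal_repeat_pattern := by
  intro g _hdom hpre
  unfold Spec_repeat_pattern repeat_pattern_alt
  unfold repeat_pattern
  match g, hpre with
  | [], _ => rfl
  | r0 :: gs, hpre =>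
    by_cases h0 : r0.isEmpty
    · simp [h0]
    · simp only [h0]
      apply mainLoopA_eq rfl hpre rfl
      intro pr hpr
      obtain ⟨⟨t, ht⟩, hlt⟩ := rangeStep_mem hpr
      constructor <;> omega
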